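-- pv_equiv track=rewrite | github.com/micaelmz/you-shop | monolith_merge.py | remove_flask_initialization
-- ===== SOURCE A (Python) =====
-- def remove_flask_initialization(app_content):
--     lines = app_content.splitlines()
--     new_content = []
--     flask_import_found = False
--     flask_init_found = False
--
--     for line in lines:
--         if "from flask" in line:
--             if not flask_import_found:
--                 flask_import_found = True
--                 continue
--         if not flask_init_found and "app = Flask(__name__)" in line:
--             flask_init_found = True
--             continue
--         new_content.append(line)
--
--     return "\n".join(new_content)
-- ===== SOURCE B (Python) =====
-- def remove_flask_initialization(app_content):
--     lines = app_content.splitlines()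
--     for i in range(len(lines)):
--         if "from flask" in lines[i]:
--             del lines[i]
--             break
--     for i in range(len(lines)):
--         if "app = Flask(__name__)" in lines[i]:
--             del lines[i]
--             break
--     return "\n".join(lines)
-- ===== Notes on version B (the rewrite author's own statement) =====
-- stated objective: simpler
-- what changed: Replaces the flag-carrying filter loop by two independent first-match deletions on the line list (delete the first 'from flask' line, then the first init line in the mutated list), with early exit instead of scanning every line with two booleans.
import Mathlib
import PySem

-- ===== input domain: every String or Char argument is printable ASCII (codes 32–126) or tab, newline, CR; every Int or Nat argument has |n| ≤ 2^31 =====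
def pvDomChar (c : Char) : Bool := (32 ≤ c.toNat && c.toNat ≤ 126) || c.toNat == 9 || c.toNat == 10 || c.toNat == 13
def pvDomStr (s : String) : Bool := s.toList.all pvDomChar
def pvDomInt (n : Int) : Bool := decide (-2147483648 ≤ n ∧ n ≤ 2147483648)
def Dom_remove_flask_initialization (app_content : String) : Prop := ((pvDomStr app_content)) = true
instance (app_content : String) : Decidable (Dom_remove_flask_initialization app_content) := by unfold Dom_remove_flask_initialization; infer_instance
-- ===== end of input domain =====

-- ===== PORT A =====
-- B replaces A's flag-carrying filter loop by two first-match deletions; objective: simpler.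
-- Loop of A, carrying the two flags; 'continue' = recurse without consing the line.
def pvALoop (imp ini : Bool) : List String → List String
  | [] => []
  | l :: rest =>
    if PySem.Str.isIn "from flask" l && !imp then
      pvALoop true ini rest
    else if !ini && PySem.Str.isIn "app = Flask(__name__)" l then
      pvALoop imp true rest
    else
      l :: pvALoop imp ini rest

def remove_flask_initialization (app_content : String) : String :=
  PySem.Str.join "\n" (pvALoop false false (PySem.Str.splitlines app_content))

-- ===== PORT B =====
-- delete the first line satisfying p (the scan-and-del-then-break loop of Source B)
def pvDelFirst (p : String → Bool) : List String → List String
  | [] => []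
  | l :: rest => if p l then rest else l :: pvDelFirst p rest

def remove_flask_initialization_alt (app_content : String) : String :=
  PySem.Str.join "\n"
    (pvDelFirst (fun l => PySem.Str.isIn "app = Flask(__name__)" l)
      (pvDelFirst (fun l => PySem.Str.isIn "from flask" l)
        (PySem.Str.splitlines app_content)))

-- ===== PRECONDITION & SPEC =====
def Spec_remove_flask_initialization (app_content : String) (out : String) : Prop := out = remove_flask_initialization_alt app_content
instance (app_content : String) (out : String) : Decidable (Spec_remove_flask_initialization app_content out) := by unfold Spec_remove_flask_initialization; infer_instance

-- ===== CLAIM (what is proved, stated in full; the proofs are below) =====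
def Claim_equal_remove_flask_initialization : Prop := ∀ (app_content : String), Dom_remove_flask_initialization app_content → Spec_remove_flask_initialization app_content (remove_flask_initialization app_content)

-- ===== LEMMAS AND PROOFS =====
theorem pvALoop_tt (ls : List String) : pvALoop true true ls = ls := by
  induction ls with
  | nil => rfl
  | cons l rest ih => simp [pvALoop, ih]

theorem pvALoop_tf (ls : List String) :
    pvALoop true false ls = pvDelFirst (fun l => PySem.Str.isIn "app = Flask(__name__)" l) ls := by
  induction ls with
  | nil => rfl
  | cons l rest ih =>
    by_cases h : PySem.Str.isIn "app = Flask(__name__)" l = true <;>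
      simp at h <;>
      simp [pvALoop, pvDelFirst, h, ih, pvALoop_tt]

theorem pvALoop_ft (ls : List String) :
    pvALoop false true ls = pvDelFirst (fun l => PySem.Str.isIn "from flask" l) ls := by
  induction ls with
  | nil => rfl
  | cons l rest ih =>
    by_cases h : PySem.Str.isIn "from flask" l = true <;>
      simp at h <;>
      simp [pvALoop, pvDelFirst, h, ih, pvALoop_tt]

theorem pvALoop_ff (ls : List String) :
    pvALoop false false ls =
      pvDelFirst (fun l => PySem.Str.isIn "app = Flask(__name__)" l)
        (pvDelFirst (fun l => PySem.Str.isIn "from flask" l) ls) := by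
  induction ls with
  | nil => rfl
  | cons l rest ih =>
    by_cases hp : PySem.Str.isIn "from flask" l = true
    · simp at hp
      simp [pvALoop, pvDelFirst, hp, pvALoop_tf]
    · by_cases hq : PySem.Str.isIn "app = Flask(__name__)" l = true <;>
        simp at hp hq <;>
        simp [pvALoop, pvDelFirst, hp, hq, ih, pvALoop_ft]

-- ===== VERDICT (by name: the statement is the Claim_ definition above) =====
theorem remove_flask_initialization_spec : Claim_equal_remove_flask_initialization := by
  intro s _
  unfold Spec_remove_flask_initialization remove_flask_initialization remove_flask_initialization_alt
  rw [pvALoop_ff]
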